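-- pv_equiv track=rewrite | github.com/vannisson/l2.0 | service/lexical_density.py | count_lexical_items
-- ===== SOURCE A (Python) =====
-- def count_lexical_items(pos_dict, freq_dict):
--     pos_subs = 0
--     pos_verbs = 0
--     pos_adj = 0
--     pos_adv = 0
--     pos_others = 0
--
--     for wd in freq_dict:
--         if (pos_dict[wd] == 'N' or pos_dict[wd] == 'NPROP'):
--             pos_subs += freq_dict[wd]
--         elif (pos_dict[wd] == 'V' or pos_dict[wd] == 'VAUX'):
--             pos_verbs += freq_dict[wd]
--         elif (pos_dict[wd] == 'ADJ'):
--             pos_adj += freq_dict[wd]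
--         elif (pos_dict[wd] == 'ADV' or pos_dict[wd] == 'ADV-KS' or pos_dict[wd] == 'ADV-KS-REL'):
--             pos_adv += freq_dict[wd]
--         else:
--             pos_others += freq_dict[wd]
--
--     return pos_subs, pos_verbs, pos_adj, pos_adv, pos_others
-- ===== SOURCE B (Python) =====
-- # B: staged passes instead of a branching accumulator loop — four filtered sums,
-- # one per tagged bucket, and 'others' obtained by subtracting them from the grand total.
--
-- def count_lexical_items(pos_dict, freq_dict):
--     items = list(freq_dict.items())
--     subs = sum(f for wd, f in items if pos_dict[wd] in ('N', 'NPROP'))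
--     verbs = sum(f for wd, f in items if pos_dict[wd] in ('V', 'VAUX'))
--     adj = sum(f for wd, f in items if pos_dict[wd] == 'ADJ')
--     adv = sum(f for wd, f in items if pos_dict[wd] in ('ADV', 'ADV-KS', 'ADV-KS-REL'))
--     others = sum(f for _, f in items) - subs - verbs - adj - adv
--     return subs, verbs, adj, adv, others
-- ===== Notes on version B (the rewrite author's own statement) =====
-- stated objective: alternative
-- what changed: Replaces A's single pass with a five-way branching accumulator by staged filtered sums: one filtered sum per tagged bucket and 'others' computed by subtracting the four bucket sums from the grand total, so no per-item branching state is carried.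
import Mathlib
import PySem

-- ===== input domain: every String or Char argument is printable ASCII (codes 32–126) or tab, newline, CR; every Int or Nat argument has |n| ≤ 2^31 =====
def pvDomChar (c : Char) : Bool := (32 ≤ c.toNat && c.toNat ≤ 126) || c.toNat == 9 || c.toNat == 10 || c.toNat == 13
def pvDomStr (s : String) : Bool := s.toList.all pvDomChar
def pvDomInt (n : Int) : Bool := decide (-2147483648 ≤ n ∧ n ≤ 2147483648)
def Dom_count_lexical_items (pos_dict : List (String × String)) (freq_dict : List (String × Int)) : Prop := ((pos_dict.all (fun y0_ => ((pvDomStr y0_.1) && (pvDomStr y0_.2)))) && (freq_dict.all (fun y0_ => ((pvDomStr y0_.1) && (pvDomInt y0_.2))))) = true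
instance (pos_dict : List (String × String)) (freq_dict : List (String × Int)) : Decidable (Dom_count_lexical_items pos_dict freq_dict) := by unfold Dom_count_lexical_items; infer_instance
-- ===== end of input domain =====

-- B replaces A's single branching-accumulator pass by staged filtered sums per bucket,
-- with 'others' obtained by subtraction from the grand total (alternative decomposition).


-- ===== PORT A =====
-- 'for wd in freq_dict' iterates the dict's keys; 'pos_dict[wd]' / 'freq_dict[wd]' are
-- first-match lookups on the association list (KeyError on pos_dict excluded by Pre_).
def count_lexical_items (pos_dict : List (String × String)) (freq_dict : List (String × Int)) : Int × Int × Int × Int × Int :=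
  freq_dict.foldl (fun s p =>
    let tag : String := (List.lookup p.1 pos_dict).getD ""   -- some by Pre_ (else KeyError)
    let f : Int := (List.lookup p.1 freq_dict).getD 0
    match s with
    | (su, ve, aj, av, ot) =>
      if tag = "N" ∨ tag = "NPROP" then (su + f, ve, aj, av, ot)
      else if tag = "V" ∨ tag = "VAUX" then (su, ve + f, aj, av, ot)
      else if tag = "ADJ" then (su, ve, aj + f, av, ot)
      else if tag = "ADV" ∨ tag = "ADV-KS" ∨ tag = "ADV-KS-REL" then (su, ve, aj, av + f, ot)
      else (su, ve, aj, av, ot + f)) (0, 0, 0, 0, 0)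

-- ===== PORT B =====
-- sum(f for wd, f in items if pred(pos_dict[wd])) — one filtered sum per bucket
def pvBucketSum (pos_dict : List (String × String)) (items : List (String × Int)) (pred : String → Bool) : Int :=
  ((items.filter (fun p => pred ((List.lookup p.1 pos_dict).getD ""))).map Prod.snd).sum

def count_lexical_items_alt (pos_dict : List (String × String)) (freq_dict : List (String × Int)) : Int × Int × Int × Int × Int :=
  let subs := pvBucketSum pos_dict freq_dict (fun t => t == "N" || t == "NPROP")
  let verbs := pvBucketSum pos_dict freq_dict (fun t => t == "V" || t == "VAUX")
  let adj := pvBucketSum pos_dict freq_dict (fun t => t == "ADJ")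
  let adv := pvBucketSum pos_dict freq_dict (fun t => t == "ADV" || t == "ADV-KS" || t == "ADV-KS-REL")
  let others := (freq_dict.map Prod.snd).sum - subs - verbs - adj - adv
  (subs, verbs, adj, adv, others)

-- ===== PRECONDITION & SPEC =====
-- Pre_ excludes (a) freq_dict words missing from pos_dict, where Python A raises KeyError, and
-- (b) association lists with duplicate freq_dict keys, which do not represent any Python dict.
def Pre_count_lexical_items (pos_dict : List (String × String)) (freq_dict : List (String × Int)) : Prop :=
  (∀ p ∈ freq_dict, (List.lookup p.1 pos_dict).isSome) ∧ (freq_dict.map Prod.fst).Nodup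
instance (pos_dict : List (String × String)) (freq_dict : List (String × Int)) : Decidable (Pre_count_lexical_items pos_dict freq_dict) := by unfold Pre_count_lexical_items; infer_instance

def pvWitness_count_lexical_items : (List (String × String)) × (List (String × Int)) :=
  ([("cat", "N"), ("runs", "V"), ("fast", "ADV"), ("x", "FOO")],
   [("cat", 3), ("runs", 2), ("fast", 1), ("x", 5)])

def Spec_count_lexical_items (pos_dict : List (String × String)) (freq_dict : List (String × Int)) (out : Int × Int × Int × Int × Int) : Prop := out = count_lexical_items_alt pos_dict freq_dict
instance (pos_dict : List (String × String)) (freq_dict : List (String × Int)) (out : Int × Int × Int × Int × Int) : Decidable (Spec_count_lexical_items pos_dict freq_dict out) := by unfold Spec_count_lexical_items; infer_instance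

-- ===== CLAIM (what is proved, stated in full; the proofs are below) =====
def Claim_equal_count_lexical_items : Prop := ∀ (pos_dict : List (String × String)) (freq_dict : List (String × Int)), Dom_count_lexical_items pos_dict freq_dict → Pre_count_lexical_items pos_dict freq_dict → Spec_count_lexical_items pos_dict freq_dict (count_lexical_items pos_dict freq_dict)

-- ===== LEMMAS AND PROOFS =====

lemma pv_lookup_of_nodup (freq_dict : List (String × Int))
    (hnd : (freq_dict.map Prod.fst).Nodup) :
    ∀ p ∈ freq_dict, List.lookup p.1 freq_dict = some p.2 := by
  induction freq_dict with
  | nil => simp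
  | cons q rest ih =>
    obtain ⟨k, v⟩ := q
    simp only [List.map_cons, List.nodup_cons] at hnd
    intro p hp
    rcases List.mem_cons.1 hp with rfl | h
    · simp [List.lookup]
    · have hne : p.1 ≠ k := fun he => hnd.1 (he ▸ List.mem_map_of_mem h)
      simp only [List.lookup, beq_eq_false_iff_ne.mpr hne]
      exact ih hnd.2 p h

-- loop invariant: A's fold over any suffix 'rest' (whose values agree with freq_dict's
-- first-match lookup) adds, componentwise, B's four filtered bucket sums over 'rest'
-- and the remainder of the grand total to the starting state.
lemma pv_loop (pos_dict : List (String × String)) (freq_dict : List (String × Int)) :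
    ∀ (rest : List (String × Int))
      (_hA : ∀ p ∈ rest, List.lookup p.1 freq_dict = some p.2)
      (su ve aj av ot : Int),
      rest.foldl (fun s p =>
        let tag : String := (List.lookup p.1 pos_dict).getD ""
        let f : Int := (List.lookup p.1 freq_dict).getD 0
        match s with
        | (su, ve, aj, av, ot) =>
          if tag = "N" ∨ tag = "NPROP" then (su + f, ve, aj, av, ot)
          else if tag = "V" ∨ tag = "VAUX" then (su, ve + f, aj, av, ot)
          else if tag = "ADJ" then (su, ve, aj + f, av, ot)
          else if tag = "ADV" ∨ tag = "ADV-KS" ∨ tag = "ADV-KS-REL" then (su, ve, aj, av + f, ot)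
          else (su, ve, aj, av, ot + f)) (su, ve, aj, av, ot)
      = (su + pvBucketSum pos_dict rest (fun t => t == "N" || t == "NPROP"),
         ve + pvBucketSum pos_dict rest (fun t => t == "V" || t == "VAUX"),
         aj + pvBucketSum pos_dict rest (fun t => t == "ADJ"),
         av + pvBucketSum pos_dict rest (fun t => t == "ADV" || t == "ADV-KS" || t == "ADV-KS-REL"),
         ot + ((rest.map Prod.snd).sum
               - pvBucketSum pos_dict rest (fun t => t == "N" || t == "NPROP")
               - pvBucketSum pos_dict rest (fun t => t == "V" || t == "VAUX")
               - pvBucketSum pos_dict rest (fun t => t == "ADJ")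
               - pvBucketSum pos_dict rest (fun t => t == "ADV" || t == "ADV-KS" || t == "ADV-KS-REL"))) := by
  intro rest
  induction rest with
  | nil => intro _ su ve aj av ot; simp [pvBucketSum]
  | cons p rest ih =>
    intro hA su ve aj av ot
    have hp : List.lookup p.1 freq_dict = some p.2 := hA p (by simp)
    have ih' := ih (fun q hq => hA q (by simp [hq]))
    simp only [List.foldl_cons, hp, Option.getD_some]
    set tag := (List.lookup p.1 pos_dict).getD "" with htag
    by_cases h1 : tag = "N" ∨ tag = "NPROP"
    · rw [if_pos h1, ih']
      have hb : (tag == "N" || tag == "NPROP") = true := by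
        rcases h1 with h | h <;> simp [h]
      have hb2 : (tag == "V" || tag == "VAUX") = false := by
        rcases h1 with h | h <;> simp [h]
      have hb3 : (tag == "ADJ") = false := by rcases h1 with h | h <;> simp [h]
      have hb4 : (tag == "ADV" || tag == "ADV-KS" || tag == "ADV-KS-REL") = false := by
        rcases h1 with h | h <;> simp [h]
      simp only [pvBucketSum, List.filter_cons, ← htag, hb, hb2, hb3, hb4,
        if_true, if_false, List.map_cons, List.sum_cons]
      refine Prod.ext ?_ (Prod.ext ?_ (Prod.ext ?_ (Prod.ext ?_ ?_))) <;> simp <;> ring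
    · rw [if_neg h1]
      push_neg at h1
      have hb : (tag == "N" || tag == "NPROP") = false := by simp [h1.1, h1.2]
      by_cases h2 : tag = "V" ∨ tag = "VAUX"
      · rw [if_pos h2, ih']
        have hb2 : (tag == "V" || tag == "VAUX") = true := by rcases h2 with h | h <;> simp [h]
        have hb3 : (tag == "ADJ") = false := by rcases h2 with h | h <;> simp [h]
        have hb4 : (tag == "ADV" || tag == "ADV-KS" || tag == "ADV-KS-REL") = false := by
          rcases h2 with h | h <;> simp [h]
        simp only [pvBucketSum, List.filter_cons, ← htag, hb, hb2, hb3, hb4,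
          if_true, if_false, List.map_cons, List.sum_cons]
        refine Prod.ext ?_ (Prod.ext ?_ (Prod.ext ?_ (Prod.ext ?_ ?_))) <;> simp <;> ring
      · rw [if_neg h2]
        push_neg at h2
        have hb2 : (tag == "V" || tag == "VAUX") = false := by simp [h2.1, h2.2]
        by_cases h3 : tag = "ADJ"
        · rw [if_pos h3, ih']
          have hb3 : (tag == "ADJ") = true := by simp [h3]
          have hb4 : (tag == "ADV" || tag == "ADV-KS" || tag == "ADV-KS-REL") = false := by
            simp [h3]
          simp only [pvBucketSum, List.filter_cons, ← htag, hb, hb2, hb3, hb4,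
            if_true, if_false, List.map_cons, List.sum_cons]
          refine Prod.ext ?_ (Prod.ext ?_ (Prod.ext ?_ (Prod.ext ?_ ?_))) <;> simp <;> ring
        · rw [if_neg h3]
          have hb3 : (tag == "ADJ") = false := by simp [h3]
          by_cases h4 : tag = "ADV" ∨ tag = "ADV-KS" ∨ tag = "ADV-KS-REL"
          · rw [if_pos h4, ih']
            have hb4 : (tag == "ADV" || tag == "ADV-KS" || tag == "ADV-KS-REL") = true := by
              rcases h4 with h | h | h <;> simp [h]
            simp only [pvBucketSum, List.filter_cons, ← htag, hb, hb2, hb3, hb4,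
              if_true, if_false, List.map_cons, List.sum_cons]
            refine Prod.ext ?_ (Prod.ext ?_ (Prod.ext ?_ (Prod.ext ?_ ?_))) <;> simp <;> ring
          · rw [if_neg h4, ih']
            push_neg at h4
            have hb4 : (tag == "ADV" || tag == "ADV-KS" || tag == "ADV-KS-REL") = false := by
              simp [h4.1, h4.2.1, h4.2.2]
            simp only [pvBucketSum, List.filter_cons, ← htag, hb, hb2, hb3, hb4,
              if_true, if_false, List.map_cons, List.sum_cons]
            refine Prod.ext ?_ (Prod.ext ?_ (Prod.ext ?_ (Prod.ext ?_ ?_))) <;> simp <;> ring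

-- ===== VERDICT (by name: the statement is the Claim_ definition above) =====
theorem count_lexical_items_spec : Claim_equal_count_lexical_items := by
  intro pos_dict freq_dict _ hpre
  unfold Spec_count_lexical_items count_lexical_items count_lexical_items_alt
  rw [pv_loop pos_dict freq_dict freq_dict (pv_lookup_of_nodup freq_dict hpre.2) 0 0 0 0 0]
  simp
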